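-- pv_equiv track=rewrite | github.com/xabrelive/sport-analyzator | backend/app/api/v1/admin.py | _compute_streaks
-- ===== SOURCE A (Python) =====
-- def _compute_streaks(statuses: list[str]) -> dict:
--     """Считает серии подряд hit/miss. statuses — список 'hit'|'miss' в хронологическом порядке."""
--     max_streak_miss = 0
--     max_streak_hit = 0
--     current_streak_miss = 0
--     current_streak_hit = 0
--     run_miss = 0
--     run_hit = 0
--     for s in statuses:
--         if s == "miss":
--             run_miss += 1
--             run_hit = 0
--             max_streak_miss = max(max_streak_miss, run_miss)
--         else:
--             run_hit += 1
--             run_miss = 0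
--             max_streak_hit = max(max_streak_hit, run_hit)
--     current_streak_miss = run_miss
--     current_streak_hit = run_hit
--     return {
--         "max_streak_miss": max_streak_miss,
--         "max_streak_hit": max_streak_hit,
--         "current_streak_miss": current_streak_miss,
--         "current_streak_hit": current_streak_hit,
--     }
-- ===== SOURCE B (Python) =====
-- def _compute_streaks(statuses):
--     """Run-length decomposition: build the list of (is_miss, length) runs once,
--     then take maxima per category and the current streaks from the last run."""
--     runs = []  # list of [is_miss, length] for each maximal run, in order
--     for s in statuses:
--         k = (s == "miss")
--         if runs and runs[-1][0] == k:
--             runs[-1][1] += 1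
--         else:
--             runs.append([k, 1])
--     max_miss = 0
--     max_hit = 0
--     last_key = False
--     last_len = 0
--     for k, n in runs:
--         if k:
--             max_miss = max(max_miss, n)
--         else:
--             max_hit = max(max_hit, n)
--         last_key, last_len = k, n
--     return {
--         "max_streak_miss": max_miss,
--         "max_streak_hit": max_hit,
--         "current_streak_miss": last_len if last_key else 0,
--         "current_streak_hit": 0 if last_key else last_len,
--     }
-- ===== Notes on version B (the rewrite author's own statement) =====
-- stated objective: alternative
-- what changed: B decomposes the sequence into maximal (is_miss, length) runs first, then derives both maxima and the current streaks from the run list, instead of A's single element-wise loop maintaining four counters.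
import Mathlib
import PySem

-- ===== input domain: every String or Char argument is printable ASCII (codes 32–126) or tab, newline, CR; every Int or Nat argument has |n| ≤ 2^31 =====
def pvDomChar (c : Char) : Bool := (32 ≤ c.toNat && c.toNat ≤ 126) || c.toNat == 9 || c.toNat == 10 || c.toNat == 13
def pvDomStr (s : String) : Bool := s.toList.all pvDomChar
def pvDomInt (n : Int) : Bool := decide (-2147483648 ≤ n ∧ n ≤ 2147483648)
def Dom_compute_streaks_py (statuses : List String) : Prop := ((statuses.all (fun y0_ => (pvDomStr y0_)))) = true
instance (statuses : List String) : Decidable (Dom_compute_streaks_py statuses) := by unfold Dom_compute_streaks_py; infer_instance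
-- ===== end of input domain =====

-- B replaces A's element-wise four-counter loop by a run-length decomposition (alternative, same cost).

-- ===== PORT A =====
-- loop body of A's for-loop over statuses (state: max_miss, max_hit, run_miss, run_hit)
def pvStepA (acc : Int × Int × Int × Int) (s : String) : Int × Int × Int × Int :=
  if s = "miss" then (max acc.1 (acc.2.2.1 + 1), acc.2.1, acc.2.2.1 + 1, 0)
  else (acc.1, max acc.2.1 (acc.2.2.2 + 1), 0, acc.2.2.2 + 1)

def compute_streaks_py (statuses : List String) : List (String × Int) :=
  let st := statuses.foldl pvStepA (0, 0, 0, 0)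
  [("max_streak_miss", st.1), ("max_streak_hit", st.2.1),
   ("current_streak_miss", st.2.2.1), ("current_streak_hit", st.2.2.2)]

-- ===== PORT B =====
-- phase 1 of B: extend the last run or start a new one (runs kept head-first, reversed at the end)
def pvAddRun (acc : List (Bool × Int)) (s : String) : List (Bool × Int) :=
  let k := decide (s = "miss")
  match acc with
  | (k', n) :: rest => if k' = k then (k', n + 1) :: rest else (k, 1) :: (k', n) :: rest
  | [] => [(k, 1)]

-- phase 2 of B: loop body over the run list (state: max_miss, max_hit, last_key, last_len)
def pvStepB (acc : Int × Int × Bool × Int) (r : Bool × Int) : Int × Int × Bool × Int :=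
  if r.1 then (max acc.1 r.2, acc.2.1, r.1, r.2)
  else (acc.1, max acc.2.1 r.2, r.1, r.2)

def compute_streaks_py_alt (statuses : List String) : List (String × Int) :=
  let runs := (statuses.foldl pvAddRun []).reverse
  let st := runs.foldl pvStepB (0, 0, false, 0)
  [("max_streak_miss", st.1), ("max_streak_hit", st.2.1),
   ("current_streak_miss", if st.2.2.1 then st.2.2.2 else 0),
   ("current_streak_hit", if st.2.2.1 then 0 else st.2.2.2)]

-- ===== PRECONDITION & SPEC =====
def Spec_compute_streaks_py (statuses : List String) (out : List (String × Int)) : Prop := out = compute_streaks_py_alt statuses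
instance (statuses : List String) (out : List (String × Int)) : Decidable (Spec_compute_streaks_py statuses out) := by unfold Spec_compute_streaks_py; infer_instance

-- ===== CLAIM (what is proved, stated in full; the proofs are below) =====
def Claim_equal_compute_streaks_py : Prop := ∀ (statuses : List String), Dom_compute_streaks_py statuses → Spec_compute_streaks_py statuses (compute_streaks_py statuses)

-- ===== LEMMAS AND PROOFS =====

-- proof-side: the run list produced from a pending run (k, n) followed by the input l
def pvRunsAux (k : Bool) (n : Int) : List String → List (Bool × Int)
  | [] => [(k, n)]
  | s :: rest =>
    if decide (s = "miss") = k then pvRunsAux k (n + 1) rest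
    else (k, n) :: pvRunsAux (decide (s = "miss")) 1 rest

-- the A-state a B-state denotes
def pvRel (b : Int × Int × Bool × Int) : Int × Int × Int × Int :=
  (b.1, b.2.1, if b.2.2.1 then b.2.2.2 else 0, if b.2.2.1 then 0 else b.2.2.2)

theorem pvAddRun_reverse (l : List String) (k : Bool) (n : Int) (rest : List (Bool × Int)) :
    (List.foldl pvAddRun ((k, n) :: rest) l).reverse = rest.reverse ++ pvRunsAux k n l := by
  induction l generalizing k n rest with
  | nil => simp [pvRunsAux]
  | cons s l ih =>
    by_cases h : decide (s = "miss") = k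
    · simp [pvAddRun, pvRunsAux, h, ih]
    · simp only [List.foldl_cons, pvAddRun, pvRunsAux]
      rw [if_neg (by simpa using fun e => h e.symm), if_neg h,
        ih (decide (s = "miss")) 1 ((k, n) :: rest)]
      simp

theorem pvEta (x : Int × Int × Bool × Int) : ((x.1, x.2.1, x.2.2) : Int × Int × Bool × Int) = x := rfl

theorem pvStepA_ext (st : Int × Int × Bool × Int) (k : Bool) (n : Int) (s : String)
    (h : decide (s = "miss") = k) :
    pvStepA (pvRel (pvStepB st (k, n))) s = pvRel (pvStepB st (k, n + 1)) := by
  cases k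
  · have hs : ¬ s = "miss" := by simpa using h
    simp [pvStepA, pvStepB, pvRel, hs]
  · have hs : s = "miss" := by simpa using h
    simp [pvStepA, pvStepB, pvRel, hs]

theorem pvStepA_switch (st : Int × Int × Bool × Int) (k : Bool) (n : Int) (s : String)
    (h : decide (s = "miss") = !k) :
    pvStepA (pvRel (pvStepB st (k, n))) s = pvRel (pvStepB (pvStepB st (k, n)) (!k, 1)) := by
  cases k
  · have hs : s = "miss" := by simpa using h
    simp [pvStepA, pvStepB, pvRel, hs]
  · have hs : ¬ s = "miss" := by simpa using h
    simp [pvStepA, pvStepB, pvRel, hs]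

theorem pvMain (l : List String) (k : Bool) (n MM MH : Int) (j : Bool × Int) :
    pvRel (List.foldl pvStepB (MM, MH, j) (pvRunsAux k n l))
      = List.foldl pvStepA (pvRel (pvStepB (MM, MH, j) (k, n))) l := by
  induction l generalizing k n MM MH j with
  | nil => rfl
  | cons s l ih =>
    by_cases h : decide (s = "miss") = k
    · rw [pvRunsAux, if_pos h, ih, List.foldl_cons, pvStepA_ext (MM, MH, j) k n s h]
    · have h' : decide (s = "miss") = !k := by cases k <;> simp_all
      rw [pvRunsAux, if_neg h, List.foldl_cons, List.foldl_cons,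
        pvStepA_switch (MM, MH, j) k n s h']
      have := ih (!k) 1 (pvStepB (MM, MH, j) (k, n)).1 (pvStepB (MM, MH, j) (k, n)).2.1
        (pvStepB (MM, MH, j) (k, n)).2.2
      rw [pvEta] at this
      rw [← this]
      congr 1
      cases k <;> simp [h']

theorem pvTop (statuses : List String) :
    statuses.foldl pvStepA (0, 0, 0, 0)
      = pvRel (((statuses.foldl pvAddRun []).reverse).foldl pvStepB (0, 0, false, 0)) := by
  cases statuses with
  | nil => rfl
  | cons s rest =>
    have h1 : (List.foldl pvAddRun [] (s :: rest)).reverse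
        = pvRunsAux (decide (s = "miss")) 1 rest := by
      have := pvAddRun_reverse rest (decide (s = "miss")) 1 []
      simpa [pvAddRun] using this
    rw [h1, pvMain rest (decide (s = "miss")) 1 0 0 (false, 0), List.foldl_cons]
    congr 1
    by_cases hs : s = "miss" <;> simp [pvStepA, pvStepB, pvRel, hs]

-- ===== VERDICT (by name: the statement is the Claim_ definition above) =====
theorem compute_streaks_py_spec : Claim_equal_compute_streaks_py := by
  intro statuses _
  unfold Spec_compute_streaks_py compute_streaks_py compute_streaks_py_alt
  rw [pvTop statuses]
  simp [pvRel]
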